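-- pv_equiv track=rewrite | github.com/DasAuto39/cigits-ce1 | trails.py | solve
-- ===== SOURCE A (Python) =====
-- MOD = 10**9 + 7
--
-- def solve(m, n, short_trails, long_trails):
--     # Initialize dp array
--     dp = [[0] * (n + 1) for _ in range(m + 1)]
--     dp[1][0] = 1  # Base case: starting from cabin 1 on day 0
--
--     # Dynamic programming transitions
--     for j in range(1, n + 1):
--         for i in range(1, m + 1):
--             # Short trail transitions
--             for k in range(1, m + 1):
--                 dp[i][j] += dp[k][j - 1]
--                 dp[i][j] %= MOD
--
--             # Long trail transition (must end up in cabin 1)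
--             dp[i][j] += dp[1][j - 1]
--             dp[i][j] %= MOD
--
--     # Compute the answer as the sum of dp[i][n] for all i
--     ans = sum(dp[i][n] for i in range(1, m + 1)) % MOD
--     return ans
-- ===== SOURCE B (Python) =====
-- MOD = 10**9 + 7
--
-- def solve(m, n, short_trails, long_trails):
--     # All dp cells of a given day j >= 1 hold the same value v_j:
--     # v_1 = 2 and v_{j+1} = (m+1) * v_j (mod MOD); the answer is m * v_n.
--     if n <= 0:
--         return 1
--     return (2 * m * pow(m + 1, n - 1, MOD)) % MOD
-- ===== Notes on version B (the rewrite author's own statement) =====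
-- stated objective: faster
-- what changed: Replaces the O(n*m^2) triple-loop DP table with the closed form m * 2 * (m+1)^(n-1) mod MOD, computed by modular exponentiation, exploiting that all dp cells of a day are equal and satisfy a scalar recurrence.
import Mathlib
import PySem

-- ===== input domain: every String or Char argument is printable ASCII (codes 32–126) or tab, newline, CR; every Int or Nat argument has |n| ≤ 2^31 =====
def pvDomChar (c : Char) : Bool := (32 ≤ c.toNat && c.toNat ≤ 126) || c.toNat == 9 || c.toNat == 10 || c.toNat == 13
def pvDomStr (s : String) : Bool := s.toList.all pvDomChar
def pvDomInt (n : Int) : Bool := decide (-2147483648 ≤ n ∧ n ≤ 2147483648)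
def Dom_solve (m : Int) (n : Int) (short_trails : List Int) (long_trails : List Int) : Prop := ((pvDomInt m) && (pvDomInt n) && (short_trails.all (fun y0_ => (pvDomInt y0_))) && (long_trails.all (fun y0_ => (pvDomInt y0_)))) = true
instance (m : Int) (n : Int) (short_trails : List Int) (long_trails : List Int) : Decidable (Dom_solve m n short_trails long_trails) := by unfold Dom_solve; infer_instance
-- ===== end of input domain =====

-- B replaces A's O(n*m^2) DP-table triple loop by the closed form m * 2 * (m+1)^(n-1) mod MOD
-- (all dp cells of a day are equal and follow the scalar recurrence v <- (m+1)*v).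

-- ===== PORT A =====
def MOD : Int := 10 ^ 9 + 7

-- dp[i][j] read / in-place write on the 2-D list; exact under Pre_solve, where every index
-- Python touches is nonnegative and in range (the pyGetD/pySetD defaults never fire).
def get2 (dp : List (List Int)) (i j : Int) : Int :=
  PySem.List.pyGetD (PySem.List.pyGetD dp i []) j 0
def set2 (dp : List (List Int)) (i j v : Int) : List (List Int) :=
  PySem.List.pySetD dp i (PySem.List.pySetD (PySem.List.pyGetD dp i []) j v)

-- the three loop bodies, folded in the same nesting order as A's loops;
-- `dp[i][j] += x; dp[i][j] %= MOD` is transcribed as one write of (dp[i][j] + x) % MOD.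
def innerBody (i j : Int) : List (List Int) → Int → List (List Int) :=
  fun dp k => set2 dp i j (PySem.Int.mod (get2 dp i j + get2 dp k (j - 1)) MOD)

def rowBody (m j : Int) : List (List Int) → Int → List (List Int) :=
  fun dp i =>
    -- short trail transitions (loop over k), then the long trail transition
    let dp' := (PySem.List.pyRange 1 (m + 1) 1).foldl (innerBody i j) dp
    set2 dp' i j (PySem.Int.mod (get2 dp' i j + get2 dp' 1 (j - 1)) MOD)

def dayBody (m : Int) : List (List Int) → Int → List (List Int) :=
  fun dp j => (PySem.List.pyRange 1 (m + 1) 1).foldl (rowBody m j) dp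

def solve (m : Int) (n : Int) (short_trails : List Int) (long_trails : List Int) : Int :=
  let dp : List (List Int) := (PySem.List.pyRange 0 (m + 1) 1).map (fun _ => PySem.List.pyRepeat [0] (n + 1))
  let dp := set2 dp 1 0 1  -- dp[1][0] = 1
  let dp := (PySem.List.pyRange 1 (n + 1) 1).foldl (dayBody m) dp
  PySem.Int.mod ((PySem.List.pyRange 1 (m + 1) 1).foldl (fun acc i => acc + get2 dp i n) 0) MOD

-- ===== PORT B =====
def solve_alt (m : Int) (n : Int) (short_trails : List Int) (long_trails : List Int) : Int :=
  if n ≤ 0 then 1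
  else PySem.Int.mod (2 * m * PySem.Int.powMod (m + 1) (n - 1).toNat MOD) MOD

-- ===== PRECONDITION & SPEC =====
-- A raises IndexError (already at dp[1][0] = 1) exactly when m < 1 or n < 0; Pre_ excludes those.
def Pre_solve (m : Int) (n : Int) (short_trails : List Int) (long_trails : List Int) : Prop :=
  1 ≤ m ∧ 0 ≤ n
instance (m : Int) (n : Int) (short_trails : List Int) (long_trails : List Int) : Decidable (Pre_solve m n short_trails long_trails) := by unfold Pre_solve; infer_instance

def pvWitness_solve : Int × Int × List Int × List Int := (2, 3, [], [])

def Spec_solve (m : Int) (n : Int) (short_trails : List Int) (long_trails : List Int) (out : Int) : Prop := out = solve_alt m n short_trails long_trails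
instance (m : Int) (n : Int) (short_trails : List Int) (long_trails : List Int) (out : Int) : Decidable (Spec_solve m n short_trails long_trails out) := by unfold Spec_solve; infer_instance

-- ===== CLAIM (what is proved, stated in full; the proofs are below) =====
def Claim_equal_solve : Prop := ∀ (m : Int) (n : Int) (short_trails : List Int) (long_trails : List Int), Dom_solve m n short_trails long_trails → Pre_solve m n short_trails long_trails → Spec_solve m n short_trails long_trails (solve m n short_trails long_trails)

-- ===== LEMMAS AND PROOFS =====

-- functional mirror of the dp table (used only by the proofs)
def innerF (i j : Int) : (Int → Int → Int) → Int → (Int → Int → Int) :=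
  fun dp k => fun i' j' =>
    if i' = i ∧ j' = j then PySem.Int.mod (dp i j + dp k (j - 1)) MOD else dp i' j'

def rowF (m j : Int) : (Int → Int → Int) → Int → (Int → Int → Int) :=
  fun dp i =>
    let dp' := (PySem.List.pyRange 1 (m + 1) 1).foldl (innerF i j) dp
    fun i' j' =>
      if i' = i ∧ j' = j then PySem.Int.mod (dp' i j + dp' 1 (j - 1)) MOD else dp' i' j'

def dayF (m : Int) : (Int → Int → Int) → Int → (Int → Int → Int) :=
  fun dp j => (PySem.List.pyRange 1 (m + 1) 1).foldl (rowF m j) dp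


-- common value of all cells dp[1..m][j] of day j ≥ 1
def colv (m : Int) : Nat → Int
  | 0 => 0
  | 1 => 2
  | (j + 2) => PySem.Int.mod ((m + 1) * colv m (j + 1)) MOD

-- the dp table after day columns 1..c have been processed
def Dmat (m : Int) (c : Nat) : Int → Int → Int := fun i j =>
  if 1 ≤ i ∧ i ≤ m then
    if j = 0 then (if i = 1 then 1 else 0)
    else if 1 ≤ j ∧ j ≤ (c : Int) then colv m j.toNat else 0
  else 0

-- mid-day state: column jn has been written for rows 1..r only
def Emat (m : Int) (jn : Nat) (r : Int) : Int → Int → Int := fun i j =>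
  if 1 ≤ i ∧ i ≤ m then
    if j = 0 then (if i = 1 then 1 else 0)
    else if 1 ≤ j ∧ j ≤ (jn : Int) - 1 then colv m j.toNat
    else if j = (jn : Int) ∧ i ≤ r then colv m jn
    else 0
  else 0

lemma MOD_pos : (0:Int) < MOD := by decide

lemma mod_add_left (x y : Int) :
    PySem.Int.mod (PySem.Int.mod x MOD + y) MOD = PySem.Int.mod (x + y) MOD := by
  simp [PySem.Int.mod_eq_emod_of_pos MOD_pos, Int.emod_add_emod]

lemma mod_mul_right (a b : Int) :
    PySem.Int.mod (a * PySem.Int.mod b MOD) MOD = PySem.Int.mod (a * b) MOD := by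
  simp only [PySem.Int.mod_eq_emod_of_pos MOD_pos]
  conv_rhs => rw [Int.mul_emod, ← Int.emod_emod_of_dvd b dvd_rfl, ← Int.mul_emod]

lemma inner_eq (i j : Int) : ∀ (L : List Int) (k : Int) (dp : Int → Int → Int),
    (k :: L).foldl (innerF i j) dp
    = fun i' j' => if i' = i ∧ j' = j then
        PySem.Int.mod (dp i j + ((k :: L).map (fun k => dp k (j - 1))).sum) MOD
      else dp i' j' := by
  intro L
  induction L with
  | nil =>
    intro k dp
    funext i' j'
    simp [innerF]
  | cons k2 L' ih =>
    intro k dp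
    have step : (k :: k2 :: L').foldl (innerF i j) dp
        = (k2 :: L').foldl (innerF i j) (innerF i j dp k) := rfl
    rw [step, ih]
    funext i' j'
    have hdp1 : ∀ k', (innerF i j dp k) k' (j - 1) = dp k' (j - 1) := by
      intro k'
      simp only [innerF]
      simp
    have hmap : (List.map (fun x => (innerF i j dp k) x (j-1)) (k2 :: L')) = (List.map (fun x => dp x (j-1)) (k2 :: L')) := by
      exact List.map_congr_left (fun x _ => hdp1 x)
    by_cases hc : i' = i ∧ j' = j
    · simp only [hc, and_self, if_true, hmap]
      have hij : (innerF i j dp k) i j = PySem.Int.mod (dp i j + dp k (j - 1)) MOD := by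
        simp [innerF]
      rw [hij, mod_add_left]
      ring_nf
      simp [List.sum_cons, add_assoc, add_comm, add_left_comm]
    · simp only [hc, if_false]
      simp only [innerF]
      simp [hc]

lemma sum_col (m : Int) (hm : 1 ≤ m) (f : Int → Int) (c : Int)
    (hf : ∀ k, 1 ≤ k → k ≤ m → f k = c) :
    ((PySem.List.pyRange 1 (m + 1) 1).map f).sum = m * c := by
  have h1 : (PySem.List.pyRange 1 (m + 1) 1).map f
      = (PySem.List.pyRange 1 (m + 1) 1).map (fun _ => c) := by
    apply List.map_congr_left
    intro x hx
    rw [PySem.List.mem_pyRange_one] at hx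
    exact hf x hx.1 (by omega)
  rw [h1, PySem.List.sum_map_const_int, PySem.List.length_pyRange_one]
  have : ((m + 1 - 1).toNat : Int) = m := by omega
  rw [this]

lemma sum_col1 (m : Int) (hm : 1 ≤ m) (f : Int → Int) (hf1 : f 1 = 1)
    (hf : ∀ k, 2 ≤ k → k ≤ m → f k = 0) :
    ((PySem.List.pyRange 1 (m + 1) 1).map f).sum = 1 := by
  rw [PySem.List.pyRange_one_cons (by omega : (1:Int) < m + 1)]
  rw [List.map_cons, List.sum_cons, hf1]
  have h0 : ((PySem.List.pyRange (1+1) (m + 1) 1).map f).sum = 0 := by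
    apply List.sum_eq_zero
    intro x hx
    rw [List.mem_map] at hx
    obtain ⟨k, hk, rfl⟩ := hx
    rw [PySem.List.mem_pyRange_one] at hk
    exact hf k hk.1 (by omega)
  rw [h0]
  norm_num

lemma row_step (m : Int) (hm : 1 ≤ m) (jn : Nat) (hjn : 1 ≤ jn) (i : Int)
    (h1 : 1 ≤ i) (h2 : i ≤ m) :
    rowF m (jn : Int) (Emat m jn (i - 1)) i = Emat m jn i := by
  have hrange : PySem.List.pyRange 1 (m + 1) 1 = 1 :: PySem.List.pyRange (1+1) (m + 1) 1 :=
    PySem.List.pyRange_one_cons (by omega)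
  set dp := Emat m jn (i - 1) with hdp
  -- the cell (i, jn) is still 0
  have hcell : dp i (jn : Int) = 0 := by
    simp only [hdp, Emat]
    split_ifs <;> first | rfl | omega
  -- value of the previous column at any admissible row
  have hprev : ∀ k, 1 ≤ k → k ≤ m → dp k ((jn:Int) - 1)
      = (if jn = 1 then (if k = 1 then 1 else 0) else colv m (jn - 1)) := by
    intro k hk1 hk2
    by_cases hj1 : jn = 1
    · subst hj1
      simp only [hdp, Emat]
      split_ifs <;> first | rfl | omega
    · have hcast : ((jn:Int) - 1).toNat = jn - 1 := by omega
      simp only [hdp, Emat, if_neg hj1]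
      rw [if_pos ⟨hk1, hk2⟩, if_neg (by omega), if_pos (by omega : 1 ≤ (jn:Int) - 1 ∧ (jn:Int) - 1 ≤ (jn:Int) - 1), hcast]
  -- the inner fold, rewritten to an explicit update
  rw [show rowF m (jn:Int) dp i
      = (fun i' j' => if i' = i ∧ j' = (jn:Int) then
          PySem.Int.mod (((PySem.List.pyRange 1 (m + 1) 1).foldl (innerF i (jn:Int)) dp) i (jn:Int)
            + ((PySem.List.pyRange 1 (m + 1) 1).foldl (innerF i (jn:Int)) dp) 1 ((jn:Int) - 1)) MOD
        else ((PySem.List.pyRange 1 (m + 1) 1).foldl (innerF i (jn:Int)) dp) i' j') from rfl]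
  rw [hrange, inner_eq]
  have hne : ¬ ((1:Int) = i ∧ (jn:Int) - 1 = (jn:Int)) := by omega
  simp only [hne, if_false, and_self, if_true, hcell, zero_add]
  rw [mod_add_left]
  -- compute the new cell value
  set S := ((1 :: PySem.List.pyRange (1+1) (m + 1) 1).map (fun k => dp k ((jn:Int) - 1))).sum with hS
  have hval : PySem.Int.mod (S + dp 1 ((jn:Int) - 1)) MOD = colv m jn := by
    by_cases hj1 : jn = 1
    · subst hj1
      have hprev1 : ∀ k, 1 ≤ k → k ≤ m → dp k (((1:Nat):Int) - 1) = if k = 1 then 1 else 0 := by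
        intro k hk1 hk2
        simpa using hprev k hk1 hk2
      have hSv : S = 1 := by
        rw [hS, ← hrange]
        apply sum_col1 m hm
        · rw [hprev1 1 le_rfl hm]; simp
        · intro k hk2 hkm
          rw [hprev1 k (by omega) hkm, if_neg (by omega)]
      rw [hSv, hprev1 1 le_rfl hm, if_pos rfl, show colv m 1 = 2 from rfl]
      decide
    · have hSv : S = m * colv m (jn - 1) := by
        rw [hS, ← hrange]
        exact sum_col m hm _ _ (fun k hk1 hk2 => by rw [hprev k hk1 hk2, if_neg hj1])
      rw [hSv, hprev 1 le_rfl hm, if_neg hj1]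
      obtain ⟨t, rfl⟩ : ∃ t, jn = t + 2 := ⟨jn - 2, by omega⟩
      show PySem.Int.mod (m * colv m (t + 2 - 1) + colv m (t + 2 - 1)) MOD = colv m (t + 2)
      have : m * colv m (t + 1) + colv m (t + 1) = (m + 1) * colv m (t + 1) := by ring
      simp only [show t + 2 - 1 = t + 1 from rfl, this, colv]
  rw [hval]
  -- the updated matrix is Emat m jn i
  funext i' j'
  by_cases hc2 : i' = i ∧ j' = (jn:Int)
  · obtain ⟨rfl, rfl⟩ := hc2
    simp only [and_self, if_true, hdp, Emat]
    split_ifs <;> first | rfl | omega | (simp_all only [true_and]; omega)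
  · rw [if_neg hc2]
    simp only [hdp, Emat]
    split_ifs <;> first | rfl | omega

lemma col_fold (m : Int) (hm : 1 ≤ m) (jn : Nat) (hjn : 1 ≤ jn) :
    ∀ (t : Nat) (i0 : Int), 1 ≤ i0 → i0 + t = m + 1 →
    (PySem.List.pyRange i0 (m + 1) 1).foldl (rowF m (jn : Int)) (Emat m jn (i0 - 1))
      = Emat m jn m := by
  intro t
  induction t with
  | zero =>
    intro i0 h1 h2
    rw [PySem.List.pyRange_one_eq_nil (by omega)]
    have : i0 - 1 = m := by omega
    rw [this]
    rfl
  | succ t ih =>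
    intro i0 h1 h2
    rw [PySem.List.pyRange_one_cons (by omega)]
    rw [List.foldl_cons, row_step m hm jn hjn i0 h1 (by omega)]
    have : Emat m jn i0 = Emat m jn (i0 + 1 - 1) := by norm_num
    rw [this]
    exact ih (i0 + 1) (by omega) (by omega)

lemma day_step (m : Int) (hm : 1 ≤ m) (jn : Nat) (hjn : 1 ≤ jn) :
    dayF m (Dmat m (jn - 1)) (jn : Int) = Dmat m jn := by
  have h0 : Dmat m (jn - 1) = Emat m jn (1 - 1) := by
    funext i j
    simp only [Dmat, Emat]
    have hcast : ((jn - 1 : Nat) : Int) = (jn : Int) - 1 := by omega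
    rw [hcast]
    split_ifs <;> first | rfl | omega
  have h1 : Emat m jn m = Dmat m jn := by
    funext i j
    simp only [Dmat, Emat]
    split_ifs <;> first | rfl | omega | (congr 1 <;> omega)
  rw [show dayF m (Dmat m (jn - 1)) (jn : Int)
      = (PySem.List.pyRange 1 (m + 1) 1).foldl (rowF m (jn : Int)) (Dmat m (jn - 1)) from rfl,
    h0, col_fold m hm jn hjn m.toNat 1 le_rfl (by omega), h1]

lemma day_fold (m : Int) (hm : 1 ≤ m) :
    ∀ (t : Nat) (j0 n : Int), 1 ≤ j0 → j0 + t = n + 1 →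
    (PySem.List.pyRange j0 (n + 1) 1).foldl (dayF m) (Dmat m (j0 - 1).toNat)
      = Dmat m n.toNat := by
  intro t
  induction t with
  | zero =>
    intro j0 n h1 h2
    rw [PySem.List.pyRange_one_eq_nil (by omega)]
    have : (j0 - 1).toNat = n.toNat := by omega
    rw [this]
    rfl
  | succ t ih =>
    intro j0 n h1 h2
    rw [PySem.List.pyRange_one_cons (by omega), List.foldl_cons]
    have hj : j0 = ((j0.toNat : Nat) : Int) := by omega
    have hstep : dayF m (Dmat m (j0 - 1).toNat) j0 = Dmat m j0.toNat := by
      have h' : (j0 - 1).toNat = j0.toNat - 1 := by omega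
      rw [h', hj]
      exact day_step m hm j0.toNat (by omega)
    rw [hstep]
    have : Dmat m j0.toNat = Dmat m (j0 + 1 - 1).toNat := by norm_num
    rw [this]
    exact ih (j0 + 1) n (by omega) (by omega)

lemma colv_eq (m : Int) : ∀ (jn : Nat), 1 ≤ jn →
    colv m jn = PySem.Int.mod (2 * (m + 1) ^ (jn - 1)) MOD := by
  intro jn
  induction jn with
  | zero => omega
  | succ t ih =>
    intro _
    by_cases ht : t = 0
    · subst ht
      show colv m 1 = _
      rw [show colv m 1 = 2 from rfl]
      simp
      decide
    · obtain ⟨u, rfl⟩ : ∃ u, t = u + 1 := ⟨t - 1, by omega⟩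
      show PySem.Int.mod ((m + 1) * colv m (u + 1)) MOD = _
      rw [ih (by omega)]
      rw [show u + 1 - 1 = u from rfl, show u + 1 + 1 - 1 = u + 1 from rfl]
      rw [mod_mul_right]
      ring_nf


-- simulation: the list-of-lists dp of port A is the pointwise table of a function dp
def encode (m n : Int) (F : Int → Int → Int) : List (List Int) :=
  (PySem.List.pyRange 0 (m + 1) 1).map (fun i => (PySem.List.pyRange 0 (n + 1) 1).map (fun j => F i j))

lemma get2_encode (m n : Int) (F : Int → Int → Int) (i j : Int)
    (hi0 : 0 ≤ i) (hi1 : i < m + 1) (hj0 : 0 ≤ j) (hj1 : j < n + 1) :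
    get2 (encode m n F) i j = F i j := by
  unfold get2 encode
  rw [PySem.List.pyGetD_map_pyRange_of_nonneg _ _ _ _ hi0 hi1,
      PySem.List.pyGetD_map_pyRange_of_nonneg _ _ _ _ hj0 hj1]

lemma set2_encode (m n : Int) (F : Int → Int → Int) (i j v : Int)
    (hi0 : 0 ≤ i) (hi1 : i < m + 1) (hj0 : 0 ≤ j) (_hj1 : j < n + 1) :
    set2 (encode m n F) i j v
      = encode m n (fun i' j' => if i' = i ∧ j' = j then v else F i' j') := by
  unfold set2 encode
  rw [PySem.List.pyGetD_map_pyRange_of_nonneg _ _ _ _ hi0 hi1]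
  rw [PySem.List.pySetD_of_nonneg _ _ hi0, PySem.List.pySetD_of_nonneg _ _ hj0]
  apply List.ext_getElem
  · simp
  · intro a h1 h2
    simp only [List.getElem_set, List.getElem_map, PySem.List.getElem_pyRange_one, zero_add]
    by_cases ha : i.toNat = a
    · rw [if_pos ha]
      apply List.ext_getElem
      · simp
      · intro b hb1 hb2
        simp only [List.getElem_set, List.getElem_map, PySem.List.getElem_pyRange_one, zero_add]
        by_cases hjb : j.toNat = b
        · rw [if_pos hjb, if_pos ⟨by omega, by omega⟩]
        · rw [if_neg hjb, if_neg (by omega)]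
          have hai : (a : Int) = i := by omega
          rw [hai]
    · rw [if_neg ha]
      apply List.map_congr_left
      intro x _
      rw [if_neg (by omega)]

lemma foldl_sim (m n : Int) : ∀ (L : List Int)
    (bodyL : List (List Int) → Int → List (List Int))
    (bodyF : (Int → Int → Int) → Int → (Int → Int → Int)),
    (∀ F k, k ∈ L → bodyL (encode m n F) k = encode m n (bodyF F k)) →
    ∀ F, L.foldl bodyL (encode m n F) = encode m n (L.foldl bodyF F) := by
  intro L
  induction L with
  | nil => intro _ _ _ F; rfl
  | cons a L ih =>
    intro bodyL bodyF h F
    rw [List.foldl_cons, List.foldl_cons, h F a (List.mem_cons_self)]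
    exact ih bodyL bodyF (fun F k hk => h F k (List.mem_cons_of_mem a hk)) _

lemma inner_sim (m n i j : Int) (hi : 1 ≤ i ∧ i ≤ m) (hj : 1 ≤ j ∧ j ≤ n)
    (F : Int → Int → Int) (k : Int) (hk : 1 ≤ k ∧ k ≤ m) :
    innerBody i j (encode m n F) k = encode m n (innerF i j F k) := by
  unfold innerBody innerF
  rw [get2_encode m n F i j (by omega) (by omega) (by omega) (by omega),
      get2_encode m n F k (j - 1) (by omega) (by omega) (by omega) (by omega),
      set2_encode m n F i j _ (by omega) (by omega) (by omega) (by omega)]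

lemma row_sim (m n j : Int) (hj : 1 ≤ j ∧ j ≤ n)
    (F : Int → Int → Int) (i : Int) (hi : 1 ≤ i ∧ i ≤ m) :
    rowBody m j (encode m n F) i = encode m n (rowF m j F i) := by
  unfold rowBody rowF
  have hin : (PySem.List.pyRange 1 (m + 1) 1).foldl (innerBody i j) (encode m n F)
      = encode m n ((PySem.List.pyRange 1 (m + 1) 1).foldl (innerF i j) F) := by
    apply foldl_sim
    intro F' k hk
    rw [PySem.List.mem_pyRange_one] at hk
    exact inner_sim m n i j hi hj F' k ⟨hk.1, by omega⟩
  rw [hin]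
  set G := (PySem.List.pyRange 1 (m + 1) 1).foldl (innerF i j) F with hG
  show set2 (encode m n G) i j (PySem.Int.mod (get2 (encode m n G) i j + get2 (encode m n G) 1 (j - 1)) MOD)
      = encode m n (fun i' j' => if i' = i ∧ j' = j then PySem.Int.mod (G i j + G 1 (j - 1)) MOD else G i' j')
  rw [get2_encode m n G i j (by omega) (by omega) (by omega) (by omega),
      get2_encode m n G 1 (j - 1) (by omega) (by omega) (by omega) (by omega),
      set2_encode m n G i j _ (by omega) (by omega) (by omega) (by omega)]

lemma day_sim (m n : Int) (hm : 1 ≤ m) (F : Int → Int → Int) (j : Int) (hj : 1 ≤ j ∧ j ≤ n) :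
    dayBody m (encode m n F) j = encode m n (dayF m F j) := by
  unfold dayBody dayF
  apply foldl_sim
  intro F' i hi
  rw [PySem.List.mem_pyRange_one] at hi
  exact row_sim m n j hj F' i ⟨hi.1, by omega⟩

-- ===== VERDICT (by name: the statement is the Claim_ definition above) =====
theorem solve_spec : Claim_equal_solve := by
  intro m n st lt _ hpre
  obtain ⟨hm, hn⟩ := hpre
  show solve m n st lt = solve_alt m n st lt
  -- the initial table is the encoding of the all-zero function
  have h0 : ((PySem.List.pyRange 0 (m + 1) 1).map (fun _ => PySem.List.pyRepeat [(0:Int)] (n + 1)))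
      = encode m n (fun _ _ => 0) := by
    unfold encode
    apply List.map_congr_left
    intro x _
    rw [PySem.List.pyRepeat_singleton]
    rw [List.map_const']
    simp
  -- dp[1][0] = 1 yields the encoding of Dmat m 0
  have h1 : set2 (encode m n (fun _ _ => 0)) 1 0 1 = encode m n (Dmat m (((1:Int) - 1).toNat)) := by
    rw [set2_encode m n _ 1 0 1 (by omega) (by omega) (by omega) (by omega)]
    congr 1
    funext i j
    simp only [Dmat]
    split_ifs <;> first | rfl | omega
  -- the day loop simulates the functional day loop, which reaches Dmat m n.toNat
  have h2 : (PySem.List.pyRange 1 (n + 1) 1).foldl (dayBody m) (encode m n (Dmat m (((1:Int) - 1).toNat)))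
      = encode m n (Dmat m n.toNat) := by
    rw [foldl_sim m n _ (dayBody m) (dayF m) (fun F j hj => by
      rw [PySem.List.mem_pyRange_one] at hj
      exact day_sim m n hm F j ⟨hj.1, by omega⟩)]
    rw [day_fold m hm n.toNat 1 n le_rfl (by omega)]
  show PySem.Int.mod ((PySem.List.pyRange 1 (m + 1) 1).foldl
      (fun acc i => acc + get2 ((PySem.List.pyRange 1 (n + 1) 1).foldl (dayBody m)
        (set2 ((PySem.List.pyRange 0 (m + 1) 1).map (fun _ => PySem.List.pyRepeat [(0:Int)] (n + 1))) 1 0 1)) i n) 0) MOD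
    = solve_alt m n st lt
  rw [h0, h1, h2]
  rw [PySem.List.foldl_congr_mem _ _ (fun acc i => acc + Dmat m n.toNat i n) 0 (by
    intro acc x hx
    rw [PySem.List.mem_pyRange_one] at hx
    rw [get2_encode m n _ x n (by omega) (by omega) (by omega) (by omega)])]
  rw [PySem.List.foldl_add, zero_add]
  by_cases hz : n = 0
  · subst hz
    have hs : ((PySem.List.pyRange 1 (m + 1) 1).map (fun i => Dmat m (0:Int).toNat i 0)).sum = 1 := by
      apply sum_col1 m hm
      · simp only [Dmat]
        split_ifs <;> first | rfl | omega
      · intro k hk2 hkm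
        simp only [Dmat]
        split_ifs <;> first | rfl | omega
    rw [hs]
    show PySem.Int.mod 1 MOD = solve_alt m 0 st lt
    rw [show solve_alt m 0 st lt = 1 from rfl]
    decide
  · have hs : ((PySem.List.pyRange 1 (m + 1) 1).map (fun i => Dmat m n.toNat i n)).sum
        = m * colv m n.toNat := by
      apply sum_col m hm
      intro k hk1 hk2
      simp only [Dmat]
      rw [if_pos ⟨hk1, hk2⟩, if_neg (by omega), if_pos (by omega : 1 ≤ n ∧ n ≤ (n.toNat : Int))]
    rw [hs, colv_eq m n.toNat (by omega), mod_mul_right]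
    rw [show solve_alt m n st lt
        = PySem.Int.mod (2 * m * PySem.Int.powMod (m + 1) (n - 1).toNat MOD) MOD from by
      simp [solve_alt]; omega]
    rw [show PySem.Int.powMod (m + 1) (n - 1).toNat MOD
        = PySem.Int.mod ((m + 1) ^ (n - 1).toNat) MOD from rfl]
    rw [mod_mul_right]
    have : (n - 1).toNat = n.toNat - 1 := by omega
    rw [this]
    ring_nf
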